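-- pv_equiv track=rewrite | github.com/Anirudh257/Audio-embedding | extraction.py | get_multihot_encoding
-- ===== SOURCE A (Python) =====
-- N_CLASSES = 527
--
-- def get_multihot_encoding(x,class_ids = list(range(N_CLASSES))):
--     enc = []
--     for i in class_ids:
--         if i in x:
--             enc.append(1)
--         else:
--             enc.append(0)
--     return enc
-- ===== SOURCE B (Python) =====
-- N_CLASSES = 527
--
-- def get_multihot_encoding(x, class_ids=list(range(N_CLASSES))):
--     index = {}
--     for pos, c in enumerate(class_ids):
--         index.setdefault(c, []).append(pos)
--     enc = [0] * len(class_ids)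
--     for v in x:
--         for p in index.get(v, []):
--             enc[p] = 1
--     return enc
-- ===== Notes on version B (the rewrite author's own statement) =====
-- stated objective: faster
-- what changed: Instead of testing 'i in x' for every class id (a linear scan of x per id), B builds an inverted index from class id to its positions once, initialises enc = [0]*len(class_ids), and makes a single pass over x marking the positions of each seen value.
import Mathlib
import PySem

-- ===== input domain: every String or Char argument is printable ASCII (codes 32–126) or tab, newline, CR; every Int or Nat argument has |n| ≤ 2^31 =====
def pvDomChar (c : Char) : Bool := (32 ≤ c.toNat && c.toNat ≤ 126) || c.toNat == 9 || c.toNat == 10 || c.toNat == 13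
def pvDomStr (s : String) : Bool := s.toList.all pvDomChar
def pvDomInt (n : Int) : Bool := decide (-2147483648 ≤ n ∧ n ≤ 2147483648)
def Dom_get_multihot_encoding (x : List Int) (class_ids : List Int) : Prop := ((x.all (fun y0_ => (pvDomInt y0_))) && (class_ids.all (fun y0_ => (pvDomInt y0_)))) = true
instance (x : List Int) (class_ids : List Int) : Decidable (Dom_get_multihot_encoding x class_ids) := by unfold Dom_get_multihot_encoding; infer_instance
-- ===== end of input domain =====

-- B replaces A's per-class-id membership scan of x by an inverted index (id → positions)
-- built once, plus one marking pass over x: asymptotically fewer membership scans.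

-- ===== PORT A =====
-- for i in class_ids: enc.append(1 if i in x else 0)
def get_multihot_encoding (x : List Int) (class_ids : List Int) : List Int :=
  class_ids.foldl (fun enc i => if i ∈ x then enc ++ [(1 : Int)] else enc ++ [(0 : Int)]) []

-- ===== PORT B =====
-- index = {}; for pos, c in enumerate(class_ids): index.setdefault(c, []).append(pos)
def pvIndex (class_ids : List Int) : PySem.Dict Int (List Int) :=
  (PySem.List.enumerate class_ids).foldl
    (fun d pc => d.modify pc.2 ([] : List Int) (fun l => l ++ [pc.1])) PySem.Dict.empty

-- enc = [0]*len(class_ids); for v in x: for p in index.get(v, []): enc[p] = 1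
def get_multihot_encoding_alt (x : List Int) (class_ids : List Int) : List Int :=
  let index := pvIndex class_ids
  let enc := List.replicate class_ids.length (0 : Int)
  x.foldl (fun enc v =>
    (index.getD v []).foldl (fun e p => PySem.List.pySetD e p (1 : Int)) enc) enc

-- ===== PRECONDITION & SPEC =====
def Spec_get_multihot_encoding (x : List Int) (class_ids : List Int) (out : List Int) : Prop := out = get_multihot_encoding_alt x class_ids
instance (x : List Int) (class_ids : List Int) (out : List Int) : Decidable (Spec_get_multihot_encoding x class_ids out) := by unfold Spec_get_multihot_encoding; infer_instance

-- ===== CLAIM (what is proved, stated in full; the proofs are below) =====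
def Claim_equal_get_multihot_encoding : Prop := ∀ (x : List Int) (class_ids : List Int), Dom_get_multihot_encoding x class_ids → Spec_get_multihot_encoding x class_ids (get_multihot_encoding x class_ids)

-- ===== LEMMAS AND PROOFS =====

-- A computes the pointwise map.
theorem portA_eq_map (x class_ids : List Int) :
    get_multihot_encoding x class_ids
      = class_ids.map (fun i => if i ∈ x then (1 : Int) else 0) := by
  unfold get_multihot_encoding
  have h : (fun (enc : List Int) (i : Int) => if i ∈ x then enc ++ [(1 : Int)] else enc ++ [(0 : Int)])
      = (fun enc i => enc ++ [if i ∈ x then (1 : Int) else 0]) := by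
    funext enc i; split <;> rfl
  rw [h, PySem.List.foldl_append_singleton_eq_map]
  simp

-- The inverted index: positions stored under key v are exactly the indices where v occurs.
theorem pvIndex_getD (class_ids : List Int) (v : Int) :
    (pvIndex class_ids).getD v []
      = (((PySem.List.enumerate class_ids).map Prod.swap).filter (fun p => p.1 == v)).map (·.2) := by
  unfold pvIndex
  rw [show (PySem.List.enumerate class_ids).foldl
        (fun d pc => d.modify pc.2 ([] : List Int) (fun l => l ++ [pc.1])) PySem.Dict.empty
      = ((PySem.List.enumerate class_ids).map Prod.swap).foldl
        (fun d p => d.modify p.1 ([] : List Int) (fun l => l ++ [p.2])) PySem.Dict.empty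
      from by rw [List.foldl_map]; rfl]
  rw [PySem.Dict.getD_foldl_modify_append]
  simp

theorem mem_pvIndex_getD (class_ids : List Int) (v p : Int) :
    p ∈ (pvIndex class_ids).getD v []
      ↔ ∃ k : Nat, p = (k : Int) ∧ class_ids[k]? = some v := by
  rw [pvIndex_getD]
  simp only [List.mem_map, List.mem_filter, PySem.List.mem_enumerate_iff]
  constructor
  · rintro ⟨a, ⟨⟨b, ⟨k, hk, rfl⟩, rfl⟩, hev⟩, rfl⟩
    refine ⟨k, by simp, ?_⟩
    rw [List.getElem?_eq_getElem hk]
    simpa using beq_iff_eq.mp hev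
  · rintro ⟨k, rfl, hv⟩
    have hk : k < class_ids.length := (List.getElem?_eq_some_iff.mp hv).1
    have heq : class_ids[k] = v := by
      rw [List.getElem?_eq_getElem hk] at hv; exact Option.some_inj.mp hv
    exact ⟨(v, (k : Int)), ⟨⟨((k : Int), class_ids[k]), ⟨k, hk, by simp⟩, by simp [heq, Prod.swap]⟩,
      by simp⟩, rfl⟩

-- Marking a list of (in-range, nonnegative) positions with 1.
theorem mark_length (ps enc : List Int) :
    (ps.foldl (fun e p => PySem.List.pySetD e p (1 : Int)) enc).length = enc.length := by
  induction ps generalizing enc with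
  | nil => rfl
  | cons p rest ih => simp [List.foldl_cons, ih, PySem.List.length_pySetD]

theorem mark_getElem? (ps : List Int) (enc : List Int)
    (h : ∀ p ∈ ps, ∃ k : Nat, p = (k : Int) ∧ k < enc.length) (q : Nat) :
    (ps.foldl (fun e p => PySem.List.pySetD e p (1 : Int)) enc)[q]?
      = if (q : Int) ∈ ps then some 1 else enc[q]? := by
  induction ps generalizing enc with
  | nil => simp
  | cons p rest ih =>
    obtain ⟨k, rfl, hk⟩ := h p (List.mem_cons_self ..)
    have hlen : (PySem.List.pySetD enc (k : Int) (1 : Int)).length = enc.length :=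
      PySem.List.length_pySetD ..
    rw [List.foldl_cons, ih _ (fun p hp => by
      obtain ⟨j, rfl, hj⟩ := h p (List.mem_cons_of_mem _ hp)
      exact ⟨j, rfl, by omega⟩)]
    by_cases hq : (q : Int) ∈ rest
    · simp [hq]
    · have : ((q : Int) ∈ (k : Int) :: rest) ↔ q = k := by
        simp [hq]
      rw [if_neg hq, PySem.List.pySetD_natCast]
      by_cases hqk : q = k
      · subst hqk; simp [this, hk]
      · have hne : k ≠ q := fun h => hqk h.symm
        simp [this, hqk, hne]

theorem outer_getElem? (x : List Int) (class_ids : List Int) (enc : List Int)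
    (hlen : enc.length = class_ids.length) (q : Nat) :
    (x.foldl (fun enc v =>
        ((pvIndex class_ids).getD v []).foldl (fun e p => PySem.List.pySetD e p (1 : Int)) enc) enc)[q]?
      = if ∃ v ∈ x, class_ids[q]? = some v then some 1 else enc[q]? := by
  induction x generalizing enc with
  | nil => simp
  | cons v rest ih =>
    have hpos : ∀ p ∈ (pvIndex class_ids).getD v [], ∃ k : Nat, p = (k : Int) ∧ k < enc.length := by
      intro p hp
      obtain ⟨k, rfl, hk⟩ := (mem_pvIndex_getD class_ids v p).mp hp
      have := (List.getElem?_eq_some_iff.mp hk).1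
      exact ⟨k, rfl, by omega⟩
    have hlen' : (((pvIndex class_ids).getD v []).foldl
        (fun e p => PySem.List.pySetD e p (1 : Int)) enc).length = class_ids.length := by
      rw [mark_length]; exact hlen
    rw [List.foldl_cons, ih _ hlen', mark_getElem? _ _ hpos q]
    have hmem : ((q : Int) ∈ (pvIndex class_ids).getD v []) ↔ class_ids[q]? = some v := by
      rw [mem_pvIndex_getD]
      constructor
      · rintro ⟨k, hqk, hv⟩
        have : q = k := by exact_mod_cast hqk
        exact this ▸ hv
      · exact fun hv => ⟨q, rfl, hv⟩
    by_cases h1 : ∃ w ∈ rest, class_ids[q]? = some w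
    · have : ∃ w ∈ v :: rest, class_ids[q]? = some w := by
        obtain ⟨w, hw, he⟩ := h1; exact ⟨w, List.mem_cons_of_mem _ hw, he⟩
      simp [h1]
    · by_cases h2 : class_ids[q]? = some v
      · have : ∃ w ∈ v :: rest, class_ids[q]? = some w := ⟨v, List.mem_cons_self .., h2⟩
        simp [hmem, h2]
      · have : ¬ ∃ w ∈ v :: rest, class_ids[q]? = some w := by
          rintro ⟨w, hw, he⟩
          rcases List.mem_cons.mp hw with rfl | hw'
          · exact h2 he
          · exact h1 ⟨w, hw', he⟩
        simp [h1, hmem, h2]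

-- ===== VERDICT (by name: the statement is the Claim_ definition above) =====
theorem get_multihot_encoding_spec : Claim_equal_get_multihot_encoding := by
  intro x class_ids _
  unfold Spec_get_multihot_encoding
  rw [portA_eq_map]
  unfold get_multihot_encoding_alt
  apply List.ext_getElem?
  intro q
  rw [outer_getElem? x class_ids _ (List.length_replicate ..) q]
  by_cases hq : q < class_ids.length
  · have he : class_ids[q]? = some class_ids[q] := List.getElem?_eq_getElem hq
    by_cases hx : class_ids[q] ∈ x
    · rw [if_pos ⟨class_ids[q], hx, he⟩]
      simp [List.getElem?_map, he, hx]
    · have hc : ¬ ∃ v ∈ x, class_ids[q]? = some v := by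
        rintro ⟨v, hv, hev⟩
        rw [he] at hev
        exact hx (Option.some_inj.mp hev ▸ hv)
      rw [if_neg hc]
      simp [hx, hq]
  · have hnone : class_ids[q]? = none := List.getElem?_eq_none_iff.mpr (by omega)
    have hc : ¬ ∃ v ∈ x, class_ids[q]? = some v := by
      rintro ⟨v, hv, hev⟩; rw [hnone] at hev; cases hev
    rw [if_neg hc]
    simp [hq]
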